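-- pv_equiv track=rewrite | github.com/sooziini/algorithm | Programmers/[코테연습]크레인인형뽑기게임.py | solution
-- ===== SOURCE A (Python) =====
-- def solution(board, moves):
--     answer = 0
--     r_board = list(map(lambda x: list(filter(lambda y: y > 0, x)), zip(*board)))
--     basket = []
--     for m in moves:
--         if r_board[m-1]:
--             tmp = r_board[m-1].pop(0)
--             if basket and basket[-1] == tmp:
--                 answer += 2
--                 basket.pop()
--             else:
--                 basket.append(tmp)
--     return answer
-- ===== SOURCE B (Python) =====
-- def solution(board, moves):
--     grid = [row[:] for row in board]
--     answer = 0
--     basket = []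
--     for m in moves:
--         c = m - 1
--         for row in grid:
--             v = row[c]
--             if v > 0:
--                 row[c] = 0
--                 if basket and basket[-1] == v:
--                     answer += 2
--                     basket.pop()
--                 else:
--                     basket.append(v)
--                 break
--     return answer
-- ===== Notes on version B (the rewrite author's own statement) =====
-- stated objective: alternative
-- what changed: B drops A's upfront transpose-and-filter (zip(*board) plus per-column positive filter and list.pop(0)); it works on a copy of the grid in row form and, per move, scans the target column top-down for the first positive cell, zeroes it, and applies the same basket pairing, so no column lists are ever built or mutated by pop(0).
-- outside the precondition, e.g. on solution([[1, 2], [1]], [0, 0]): A returns 2, B returns 0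
import Mathlib
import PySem

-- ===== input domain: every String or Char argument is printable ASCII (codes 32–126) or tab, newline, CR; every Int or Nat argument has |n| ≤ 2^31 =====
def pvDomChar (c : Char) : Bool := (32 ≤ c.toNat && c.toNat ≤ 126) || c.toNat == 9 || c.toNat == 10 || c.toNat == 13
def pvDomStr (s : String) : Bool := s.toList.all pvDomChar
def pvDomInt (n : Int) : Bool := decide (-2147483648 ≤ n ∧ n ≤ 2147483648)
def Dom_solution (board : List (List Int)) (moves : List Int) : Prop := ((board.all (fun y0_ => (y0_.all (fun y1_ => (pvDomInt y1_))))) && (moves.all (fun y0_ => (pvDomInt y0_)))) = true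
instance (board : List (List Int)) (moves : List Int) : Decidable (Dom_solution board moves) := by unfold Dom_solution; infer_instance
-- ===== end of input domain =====

-- B replaces A's upfront transpose-and-filter (zip(*board) + per-column positive filter + pop(0))
-- with a per-move top-down scan of the target column of a row-form copy of the grid (objective: alternative).

-- ===== PORT A =====
-- zip(*rows) for a list of int-rows: columns up to the shortest row (Python zip truncation; exact).
def pyZipT : List (List Int) → List (List Int)
  | [] => []
  | r :: rs =>
    if h : ((r :: rs).any (fun q => q.isEmpty)) then []
    else ((r :: rs).map (fun q => q.headD 0)) :: pyZipT ((r :: rs).map (fun q => q.tail))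
termination_by l => (l.headD []).length
decreasing_by
  simp only [List.any_cons, List.any_eq_true, Bool.or_eq_true, not_or] at h
  cases r with
  | nil => exact absurd h.1 (by simp)
  | cons a t => simp

-- one move of A: index r_board[m-1] (IndexError → none, excluded by Pre_), pop(0), basket logic
def stepA (st : Int × List (List Int) × List Int) (m : Int) : Int × List (List Int) × List Int :=
  match st with
  | (ans, rb, basket) =>
    match PySem.List.pyGet? rb (m - 1) with
    | none => (ans, rb, basket)   -- IndexError in Python; Pre_ excludes this
    | some col =>
      match col with
      | [] => (ans, rb, basket)
      | tmp :: rest =>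
        let rb' := PySem.List.pySetD rb (m - 1) rest   -- the in-place pop(0) on r_board[m-1]
        if basket ≠ [] ∧ basket.getLast? = some tmp then (ans + 2, rb', basket.dropLast)
        else (ans, rb', basket ++ [tmp])

def solution (board : List (List Int)) (moves : List Int) : Int :=
  let rBoard := (pyZipT board).map (fun x => x.filter (fun y => decide (y > 0)))
  (moves.foldl stepA (0, rBoard, [])).1

-- ===== PORT B =====
-- inner 'for row in grid' loop: first row whose cell in column c (Python index) is positive;
-- returns that value and the grid with the cell zeroed, none if no break happened (or IndexError, excluded by Pre_)
def scanCol (c : Int) : List (List Int) → Option (Int × List (List Int))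
  | [] => none
  | row :: rest =>
    match PySem.List.pyGet? row c with
    | none => none   -- IndexError in Python; Pre_ excludes this
    | some v =>
      if v > 0 then some (v, PySem.List.pySetD row c 0 :: rest)
      else
        match scanCol c rest with
        | none => none
        | some (v', rest') => some (v', row :: rest')

def stepB (st : Int × List (List Int) × List Int) (m : Int) : Int × List (List Int) × List Int :=
  match st with
  | (ans, grid, basket) =>
    match scanCol (m - 1) grid with
    | none => (ans, grid, basket)
    | some (v, grid') =>
      if basket ≠ [] ∧ basket.getLast? = some v then (ans + 2, grid', basket.dropLast)
      else (ans, grid', basket ++ [v])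

def solution_alt (board : List (List Int)) (moves : List Int) : Int :=
  (moves.foldl stepB (0, board, [])).1

-- ===== PRECONDITION & SPEC =====
-- minimum row length (= len(list(zip(*board))), the number of columns A's r_board has); 0 for an empty board
def minLenN : List Nat → Nat
  | [] => 0
  | [a] => a
  | a :: b :: t => min a (minLenN (b :: t))

def pvMinLen (board : List (List Int)) : Nat := minLenN (board.map (fun r => r.length))

-- Pre_ admits every move whose column index is Python-valid for A's r_board: positive moves 1..minL on ANY
-- board (zip truncation never matters there), and non-positive (negative-index wraparound) moves only on
-- RECTANGULAR boards, where A's column-list wraparound and B's per-row wraparound name the same column.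
-- It excludes moves that make A raise IndexError, and non-positive (wraparound) moves on ragged boards —
-- a corner no caller would specify, where A wraps within the truncated column list and B wraps within each
-- row, and both readings are equally defensible (see the cite).
def Pre_solution (board : List (List Int)) (moves : List Int) : Prop :=
  ∀ m ∈ moves,
    (1 ≤ m ∧ m ≤ (pvMinLen board : Int)) ∨
    ((∀ r ∈ board, r.length = pvMinLen board) ∧ 1 - (pvMinLen board : Int) ≤ m ∧ m ≤ 0)
instance (board : List (List Int)) (moves : List Int) : Decidable (Pre_solution board moves) := by
  unfold Pre_solution; infer_instance

def pvWitness_solution : List (List Int) × List Int := ([[0, 1], [3, 5], [-2, 2]], [1, 2, 2, 1, 0, -1])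

def Spec_solution (board : List (List Int)) (moves : List Int) (out : Int) : Prop := out = solution_alt board moves
instance (board : List (List Int)) (moves : List Int) (out : Int) : Decidable (Spec_solution board moves out) := by unfold Spec_solution; infer_instance

-- ===== CLAIM (what is proved, stated in full; the proofs are below) =====
def Claim_equal_solution : Prop := ∀ (board : List (List Int)) (moves : List Int), Dom_solution board moves → Pre_solution board moves → Spec_solution board moves (solution board moves)

-- ===== LEMMAS AND PROOFS =====

def colAt (grid : List (List Int)) (j : Nat) : List Int := grid.map (fun r => r.getD j 0)

def fcols (grid : List (List Int)) : List (List Int) :=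
  (List.range (pvMinLen grid)).map (fun j => (colAt grid j).filter (fun y => decide (y > 0)))

lemma minLenN_le_mem {l : List Nat} {a : Nat} (h : a ∈ l) : minLenN l ≤ a := by
  induction l with
  | nil => simp at h
  | cons x t ih =>
    cases t with
    | nil => simp at h; simp [minLenN, h]
    | cons y s =>
      rcases List.mem_cons.mp h with rfl | h'
      · simp [minLenN]
      · exact le_trans (by simp [minLenN]) (ih h')

lemma pvMinLen_le_mem {grid : List (List Int)} {r : List Int} (h : r ∈ grid) :
    pvMinLen grid ≤ r.length :=
  minLenN_le_mem (List.mem_map.mpr ⟨r, h, rfl⟩)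

lemma minLenN_pred : ∀ l : List Nat, l ≠ [] → minLenN (l.map (fun a => a - 1)) = minLenN l - 1
  | [], h => absurd rfl h
  | [_], _ => rfl
  | a :: b :: t, _ => by
    have ih := minLenN_pred (b :: t) (by simp)
    simp only [List.map_cons, minLenN] at ih ⊢
    omega

lemma pvMinLen_tail (r : List Int) (rs : List (List Int)) :
    pvMinLen ((r :: rs).map (fun q => q.tail)) = pvMinLen (r :: rs) - 1 := by
  have h1 : ((r :: rs).map (fun q => q.tail)).map (fun q => q.length)
      = ((r :: rs).map (fun q => q.length)).map (fun a => a - 1) := by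
    simp [List.map_map, Function.comp]
  unfold pvMinLen
  rw [h1, minLenN_pred _ (by simp)]

lemma minLenN_pos : ∀ l : List Nat, (∀ a ∈ l, 1 ≤ a) → l ≠ [] → 1 ≤ minLenN l
  | [], _, hne => absurd rfl hne
  | [a], h, _ => h a (by simp)
  | a :: b :: t, h, _ => by
    have ih := minLenN_pos (b :: t) (fun x hx => h x (by simp [hx])) (by simp)
    simp only [minLenN, le_min_iff]
    exact ⟨h a (by simp), ih⟩

lemma pvMinLen_pos (r : List Int) (rs : List (List Int))
    (h : ∀ q ∈ r :: rs, q ≠ []) : 1 ≤ pvMinLen (r :: rs) := by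
  refine minLenN_pos _ (fun a ha => ?_) (by simp)
  obtain ⟨q, hq, rfl⟩ := List.mem_map.mp ha
  have := h q hq
  cases q with
  | nil => exact absurd rfl this
  | cons _ _ => simp

lemma headD_eq_getD (q : List Int) : q.headD 0 = q.getD 0 0 := by cases q <;> simp

lemma getD_tail (q : List Int) (j : Nat) : q.tail.getD j 0 = q.getD (j + 1) 0 := by
  cases q <;> simp [List.getD]

lemma colAt_cons (row : List Int) (rest : List (List Int)) (j : Nat) :
    colAt (row :: rest) j = row.getD j 0 :: colAt rest j := rfl

lemma pyZipT_eq_cols (grid : List (List Int)) :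
    pyZipT grid = (List.range (pvMinLen grid)).map (colAt grid) := by
  induction grid using pyZipT.induct with
  | case1 => simp [pyZipT, pvMinLen, minLenN]
  | case2 r rs h =>
    obtain ⟨q, hq, hqe⟩ := List.any_eq_true.mp h
    have hq0 : pvMinLen (r :: rs) = 0 :=
      Nat.le_zero.mp (by simpa [List.isEmpty_iff.mp hqe] using pvMinLen_le_mem hq)
    rw [pyZipT]
    simp [h, hq0]
  | case3 r rs h ih =>
    have hne : ∀ q ∈ r :: rs, q ≠ [] := by
      intro q hq hqe
      simp only [List.any_eq_true, not_exists, not_and] at h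
      exact h q hq (List.isEmpty_iff.mpr hqe)
    have hpos := pvMinLen_pos r rs hne
    obtain ⟨k, hk⟩ : ∃ k, pvMinLen (r :: rs) = k + 1 :=
      ⟨pvMinLen (r :: rs) - 1, (Nat.succ_pred_eq_of_pos hpos).symm⟩
    have hR : (List.range (k + 1)).map (colAt (r :: rs))
        = colAt (r :: rs) 0 :: (List.range k).map (fun j => colAt (r :: rs) (j + 1)) := by
      rw [List.range_succ_eq_map, List.map_cons, List.map_map]
      rfl
    rw [pyZipT, dif_neg h, ih, pvMinLen_tail, hk, Nat.add_sub_cancel, hR]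
    refine List.cons_eq_cons.mpr ⟨?_, ?_⟩
    · unfold colAt
      exact List.map_congr_left (fun q _ => headD_eq_getD q)
    · apply List.map_congr_left
      intro j _
      show colAt ((r :: rs).map (fun q => q.tail)) j = colAt (r :: rs) (j + 1)
      unfold colAt
      rw [List.map_map]
      exact List.map_congr_left (fun q _ => getD_tail q j)

lemma fcols_eq (grid : List (List Int)) :
    (pyZipT grid).map (fun x => x.filter (fun y => decide (y > 0))) = fcols grid := by
  simp [pyZipT_eq_cols, fcols, List.map_map, Function.comp]

-- index resolution: under Pre_, the Python index c names Nat position j in every list of length ≥ pvMinLen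
lemma resolve_get {α : Type} (xs : List α) (d : α) (c : Int) (j : Nat)
    (hj : j < xs.length)
    (hres : c = (j : Int) ∨ c + (xs.length : Int) = (j : Int) ∧ c < 0) :
    PySem.List.pyGet? xs c = some (xs.getD j d) := by
  rcases hres with rfl | ⟨hc, hn⟩
  · simp [PySem.List.pyGet?_natCast, List.getElem?_eq_getElem hj]
  · have h1 : ¬ 0 ≤ c := by omega
    have h2 : xs.length - (-c).toNat = j := by omega
    simp [PySem.List.pyGet?, PySem.List.pyIdx?, h1, (by omega : -(xs.length : Int) ≤ c), h2,
      List.getElem?_eq_getElem hj]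

lemma resolve_set {α : Type} (xs : List α) (v : α) (c : Int) (j : Nat)
    (hj : j < xs.length)
    (hres : c = (j : Int) ∨ c + (xs.length : Int) = (j : Int) ∧ c < 0) :
    PySem.List.pySetD xs c v = xs.set j v := by
  rcases hres with rfl | ⟨hc, hn⟩
  · simp
  · have h1 : ¬ 0 ≤ c := by omega
    have h2 : xs.length - (-c).toNat = j := by omega
    simp [PySem.List.pySetD, PySem.List.pySet?, PySem.List.pyIdx?, h1,
      (by omega : -(xs.length : Int) ≤ c), h2]

lemma getD_set_ne (row : List Int) (x : Int) (j j' : Nat) (hne : j' ≠ j) :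
    (row.set j x).getD j' 0 = row.getD j' 0 := by
  simp [List.getD, hne.symm]

-- scan lemmas: the inner loop of B seen through column j
lemma scanCol_none (c : Int) (j : Nat) (grid : List (List Int))
    (hr : ∀ r ∈ grid, j < r.length ∧
        (c = (j : Int) ∨ c + (r.length : Int) = (j : Int) ∧ c < 0))
    (hcol : (colAt grid j).filter (fun y => decide (y > 0)) = []) :
    scanCol c grid = none := by
  induction grid with
  | nil => rfl
  | cons row rest ih =>
    obtain ⟨hjr, hres⟩ := hr row (by simp)
    have hget := resolve_get row 0 c j hjr hres
    rw [colAt_cons, List.filter_cons] at hcol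
    by_cases hv : row.getD j 0 > 0
    · rw [if_pos (by simpa using hv)] at hcol
      simp at hcol
    · rw [if_neg (by simpa using hv)] at hcol
      have hrec := ih (fun r hrm => hr r (by simp [hrm])) hcol
      have hv2 : ¬ (0 < row[j]?.getD 0) := by simpa [List.getD] using hv
      simp [scanCol, hget, hv2, hrec]

lemma scanCol_some (c : Int) (j : Nat) (grid : List (List Int)) (v : Int) (vs : List Int)
    (hr : ∀ r ∈ grid, j < r.length ∧
        (c = (j : Int) ∨ c + (r.length : Int) = (j : Int) ∧ c < 0))
    (hcol : (colAt grid j).filter (fun y => decide (y > 0)) = v :: vs) :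
    ∃ grid', scanCol c grid = some (v, grid') ∧
      grid'.map (fun r => r.length) = grid.map (fun r => r.length) ∧
      (colAt grid' j).filter (fun y => decide (y > 0)) = vs ∧
      (∀ j', j' ≠ j → colAt grid' j' = colAt grid j') := by
  induction grid with
  | nil => simp [colAt] at hcol
  | cons row rest ih =>
    obtain ⟨hjr, hres⟩ := hr row (by simp)
    have hget := resolve_get row 0 c j hjr hres
    have hset := resolve_set row (0 : Int) c j hjr hres
    rw [colAt_cons, List.filter_cons] at hcol
    by_cases hv : row.getD j 0 > 0
    · rw [if_pos (by simpa using hv)] at hcol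
      obtain ⟨rfl, hvs⟩ := List.cons_eq_cons.mp hcol
      refine ⟨row.set j 0 :: rest, ?_, ?_, ?_, ?_⟩
      · have hv2 : 0 < row[j]?.getD 0 := by simpa [List.getD] using hv
        simp [scanCol, hget, hv2, hset]
      · simp
      · have hz : (row.set j 0).getD j 0 = 0 := by
          simp [List.getD, hjr]
        rw [colAt_cons, List.filter_cons, hz, if_neg (by simp)]
        exact hvs
      · intro j' hne
        rw [colAt_cons, colAt_cons, getD_set_ne row 0 j j' hne]
    · rw [if_neg (by simpa using hv)] at hcol
      obtain ⟨rest', hscan, hlen, hfil, hoth⟩ :=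
        ih (fun r hrm => hr r (by simp [hrm])) hcol
      refine ⟨row :: rest', ?_, ?_, ?_, ?_⟩
      · have hv2 : ¬ (0 < row[j]?.getD 0) := by simpa [List.getD] using hv
        simp [scanCol, hget, hv2, hscan]
      · simp [hlen]
      · rw [colAt_cons, List.filter_cons, if_neg (by simpa using hv)]
        exact hfil
      · intro j' hne
        rw [colAt_cons, colAt_cons, hoth j' hne]

lemma pvMinLen_congr {g1 g2 : List (List Int)}
    (h : g1.map (fun r => r.length) = g2.map (fun r => r.length)) :
    pvMinLen g1 = pvMinLen g2 := by
  unfold pvMinLen; rw [h]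

lemma fcols_getElem (grid : List (List Int)) (j : Nat) (h : j < (fcols grid).length) :
    (fcols grid)[j] = (colAt grid j).filter (fun y => decide (y > 0)) := by
  simp [fcols]

lemma length_fcols (grid : List (List Int)) : (fcols grid).length = pvMinLen grid := by
  simp [fcols]

lemma fcols_getD (grid : List (List Int)) (j : Nat) (hj : j < pvMinLen grid) :
    (fcols grid).getD j [] = (colAt grid j).filter (fun y => decide (y > 0)) := by
  rw [List.getD_eq_getElem _ _ (by simpa [length_fcols] using hj)]
  exact fcols_getElem grid j (by simpa [length_fcols] using hj)

lemma fcols_update (grid grid' : List (List Int)) (j : Nat) (vs : List Int)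
    (hlen : grid'.map (fun r => r.length) = grid.map (fun r => r.length))
    (hfil : (colAt grid' j).filter (fun y => decide (y > 0)) = vs)
    (hoth : ∀ j', j' ≠ j → colAt grid' j' = colAt grid j') :
    fcols grid' = (fcols grid).set j vs := by
  apply List.ext_getElem
  · simp [fcols, pvMinLen_congr hlen]
  · intro i h1 h2
    rw [fcols_getElem grid' i h1, List.getElem_set]
    by_cases hij : j = i
    · subst hij
      rw [if_pos rfl, ← hfil]
    · rw [if_neg hij, fcols_getElem grid i (by simpa [length_fcols, pvMinLen_congr hlen] using h1),
        hoth i (fun hh => hij hh.symm)]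

-- one move: A's step on the filtered columns equals B's step on the grid
lemma step_sim (grid : List (List Int)) (ans : Int) (basket : List Int) (m : Int) (j : Nat)
    (hj : j < pvMinLen grid)
    (hres : ∀ r ∈ grid, j < r.length ∧
        (m - 1 = (j : Int) ∨ m - 1 + (r.length : Int) = (j : Int) ∧ m - 1 < 0))
    (hresrb : m - 1 = (j : Int) ∨ m - 1 + ((fcols grid).length : Int) = (j : Int) ∧ m - 1 < 0) :
    ∃ ans' basket' grid',
      stepA (ans, fcols grid, basket) m = (ans', fcols grid', basket') ∧
      stepB (ans, grid, basket) m = (ans', grid', basket') ∧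
      grid'.map (fun r => r.length) = grid.map (fun r => r.length) := by
  have hrbj : j < (fcols grid).length := by simpa [length_fcols] using hj
  have hget0 := resolve_get (fcols grid) [] (m - 1) j hrbj hresrb
  rw [fcols_getD grid j hj] at hget0
  cases hcase : (colAt grid j).filter (fun y => decide (y > 0)) with
  | nil =>
    have hget : PySem.List.pyGet? (fcols grid) (m - 1) = some [] := by rw [hget0, hcase]
    have hB := scanCol_none (m - 1) j grid hres hcase
    exact ⟨ans, basket, grid, by simp [stepA, hget], by simp [stepB, hB], rfl⟩
  | cons v vs =>
    have hget : PySem.List.pyGet? (fcols grid) (m - 1) = some (v :: vs) := by rw [hget0, hcase]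
    obtain ⟨grid', hscan, hlen, hfil, hoth⟩ := scanCol_some (m - 1) j grid v vs hres hcase
    have hset := resolve_set (fcols grid) vs (m - 1) j hrbj hresrb
    have hrb' : PySem.List.pySetD (fcols grid) (m - 1) vs = fcols grid' := by
      rw [hset, fcols_update grid grid' j vs hlen hfil hoth]
    by_cases hb : basket ≠ [] ∧ basket.getLast? = some v
    · exact ⟨ans + 2, basket.dropLast, grid',
        by simp [stepA, hget, hrb', hb], by simp [stepB, hscan, hb], hlen⟩
    · exact ⟨ans, basket ++ [v], grid',
        by simp only [stepA, hget, hrb']; rw [if_neg hb],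
        by simp only [stepB, hscan]; rw [if_neg hb], hlen⟩

lemma loop_eq (moves : List Int) (board : List (List Int)) :
    ∀ (ans : Int) (basket : List Int) (grid : List (List Int)),
      grid.map (fun r => r.length) = board.map (fun r => r.length) →
      Pre_solution board moves →
      (moves.foldl stepA (ans, fcols grid, basket)).1 = (moves.foldl stepB (ans, grid, basket)).1 := by
  induction moves with
  | nil => intro ans basket grid _ _; rfl
  | cons m ms ih =>
    intro ans basket grid hshape hpre
    have hm := hpre m (by simp)
    have hrest : Pre_solution board ms := fun x hx => hpre x (by simp [hx])
    have hmin : pvMinLen grid = pvMinLen board := pvMinLen_congr hshape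
    have hrlen : ∀ r ∈ grid, pvMinLen board ≤ r.length := by
      intro r hrm
      have := pvMinLen_le_mem hrm
      omega
    have hrb : (fcols grid).length = pvMinLen board := by rw [length_fcols, hmin]
    -- the resolved column index j
    obtain ⟨j, hj, hres, hresrb⟩ :
        ∃ j : Nat, j < pvMinLen grid ∧
          (∀ r ∈ grid, j < r.length ∧
            (m - 1 = (j : Int) ∨ m - 1 + (r.length : Int) = (j : Int) ∧ m - 1 < 0)) ∧
          (m - 1 = (j : Int) ∨ m - 1 + ((fcols grid).length : Int) = (j : Int) ∧ m - 1 < 0) := by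
      rcases hm with ⟨h1, h2⟩ | ⟨hrect, h1, h2⟩
      · refine ⟨(m - 1).toNat, by omega, fun r hrm => ⟨by have := hrlen r hrm; omega, Or.inl (by omega)⟩,
          Or.inl (by omega)⟩
      · have hgl : ∀ r ∈ grid, r.length = pvMinLen board := by
          intro r hrm
          have h3 : r.length ∈ grid.map (fun r => r.length) := List.mem_map.mpr ⟨r, hrm, rfl⟩
          rw [hshape] at h3
          obtain ⟨q, hq, hql⟩ := List.mem_map.mp h3
          rw [← hql]
          exact hrect q hq
        refine ⟨(m - 1 + (pvMinLen board : Int)).toNat, by omega, fun r hrm => ?_, ?_⟩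
        · have := hgl r hrm
          exact ⟨by omega, Or.inr ⟨by omega, by omega⟩⟩
        · rw [hrb]
          exact Or.inr ⟨by omega, by omega⟩
    obtain ⟨ans', basket', grid', hA, hB, hlen⟩ := step_sim grid ans basket m j hj hres hresrb
    rw [List.foldl_cons, List.foldl_cons, hA, hB]
    exact ih ans' basket' grid' (hlen.trans hshape) hrest

-- ===== VERDICT (by name: the statement is the Claim_ definition above) =====
theorem solution_spec : Claim_equal_solution := by
  intro board moves _ hpre
  unfold Spec_solution solution solution_alt
  rw [fcols_eq]
  exact loop_eq moves board 0 [] board rfl hpre
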